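-- pv_equiv track=rewrite | github.com/ThomasTrepanier/log6307-final-project | data/pyscent/stackoverflow/code-dump/36112_92.py | shortest_equivalent_binarian
-- ===== SOURCE A (Python) =====
-- def shortest_equivalent_binarian(A):
--    s = set()
--    for a in A:
--        while a in s: # carry propagation
--            s.remove(a)
--            a += 1
--        s.add(a)
--    return sorted(s, reverse=True)
-- ===== SOURCE B (Python) =====
-- def shortest_equivalent_binarian(A):
--     asc = []
--     for a in A:
--         lo, hi = 0, len(asc)
--         while lo < hi:
--             mid = (lo + hi) // 2
--             if asc[mid] < a:
--                 lo = mid + 1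
--             else:
--                 hi = mid
--         j = lo
--         while j < len(asc) and asc[j] == a:
--             a += 1
--             j += 1
--         asc[lo:j] = [a]
--     return asc[::-1]
-- ===== Notes on version B (the rewrite author's own statement) =====
-- stated objective: alternative
-- what changed: B replaces A's hash-set with membership-driven carry loops plus a final sort by maintaining the result as a strictly ascending list: each exponent is placed by binary search, carried through the run of consecutive occupied positions, and spliced in, with the list reversed at the end (no set, no sort); B trades A's hash set for an ordered list and is slower on large inputs with many distinct exponents.
import Mathlib
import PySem

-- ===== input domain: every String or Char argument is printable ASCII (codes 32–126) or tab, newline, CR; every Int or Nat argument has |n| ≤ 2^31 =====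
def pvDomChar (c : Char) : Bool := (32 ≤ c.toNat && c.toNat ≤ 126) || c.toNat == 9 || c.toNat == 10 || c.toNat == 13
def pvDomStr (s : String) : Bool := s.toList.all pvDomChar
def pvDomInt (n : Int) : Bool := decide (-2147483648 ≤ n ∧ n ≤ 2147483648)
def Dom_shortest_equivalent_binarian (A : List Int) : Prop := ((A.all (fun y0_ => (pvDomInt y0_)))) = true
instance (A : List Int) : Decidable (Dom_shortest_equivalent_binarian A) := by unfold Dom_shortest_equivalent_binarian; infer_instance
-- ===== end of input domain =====

-- B replaces A's hash-set with carry-propagation-by-membership plus a final sort by a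
-- strictly ascending result list maintained with a linear merge-insertion (no set, no sort);
-- objective: alternative.

-- ===== PORT A =====
-- the 'while a in s: s.remove(a); a += 1' loop followed by 's.add(a)'
-- (s.remove(a) is exact as Set.discard here because the loop guard ensures a ∈ s)
def pvCarryA (s : PySem.Set Int) (a : Int) : PySem.Set Int :=
  if h : a ∈ s then
    pvCarryA (PySem.Set.discard s a) (a + 1)
  else
    PySem.Set.add s a
termination_by s.length
decreasing_by
  simp only [PySem.Set.discard]
  exact List.length_filter_lt_length_iff_exists.mpr ⟨a, h, by simp⟩

def shortest_equivalent_binarian (A : List Int) : List Int :=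
  PySem.List.sorted (A.foldl (fun s a => pvCarryA s a) PySem.Set.empty) (fun x => x) true

-- ===== PORT B =====
-- first while loop of Source B: binary search for the first index lo with asc[lo] >= a
-- (lo, hi, mid, j stay in [0, len(asc)] in Python, so Nat indices and Nat '/' 2 are exact;
--  asc[mid] / asc[j] are read under the guards mid < hi <= len / j < len, so getD is exact)
def pvBisect (asc : List Int) (a : Int) (lo hi : Nat) : Nat :=
  if _h : lo < hi then
    -- mid = (lo + hi) // 2
    if asc.getD ((lo + hi) / 2) 0 < a then pvBisect asc a ((lo + hi) / 2 + 1) hi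
    else pvBisect asc a lo ((lo + hi) / 2)
  else lo
termination_by hi - lo
decreasing_by all_goals omega

-- second while loop of Source B: consume the run of elements equal to the (carried) value
def pvRun (asc : List Int) (a : Int) (j : Nat) : Int × Nat :=
  if _h : j < asc.length then
    if asc.getD j 0 = a then pvRun asc (a + 1) (j + 1) else (a, j)
  else (a, j)
termination_by asc.length - j

-- one iteration of Source B's for-loop body: the slice assignment asc[lo:j] = [a]
def pvStep (a : Int) (asc : List Int) : List Int :=
  let lo := pvBisect asc a 0 asc.length
  let q := pvRun asc a lo
  asc.take lo ++ [q.1] ++ asc.drop q.2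

def shortest_equivalent_binarian_alt (A : List Int) : List Int :=
  (A.foldl (fun asc a => pvStep a asc) []).reverse

-- ===== PRECONDITION & SPEC =====
def Spec_shortest_equivalent_binarian (A : List Int) (out : List Int) : Prop := out = shortest_equivalent_binarian_alt A
instance (A : List Int) (out : List Int) : Decidable (Spec_shortest_equivalent_binarian A out) := by unfold Spec_shortest_equivalent_binarian; infer_instance

-- ===== CLAIM (what is proved, stated in full; the proofs are below) =====
def Claim_equal_shortest_equivalent_binarian : Prop := ∀ (A : List Int), Dom_shortest_equivalent_binarian A → Spec_shortest_equivalent_binarian A (shortest_equivalent_binarian A)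

-- ===== LEMMAS AND PROOFS =====

-- proof-side model of one Source B iteration: the same split/run/splice expressed structurally
def pvMergeLt (a : Int) (l : List Int) : List Int × List Int :=
  match l with
  | [] => ([], [])
  | h :: t =>
    if h < a then
      let p := pvMergeLt a t
      (h :: p.1, p.2)
    else ([], h :: t)

def pvMergeEq (a : Int) (l : List Int) : Int × List Int :=
  match l with
  | [] => (a, [])
  | h :: t => if h = a then pvMergeEq (a + 1) t else (a, h :: t)

def pvMergeIns (a : Int) (asc : List Int) : List Int :=
  let p := pvMergeLt a asc
  let q := pvMergeEq a p.2
  p.1 ++ q.1 :: q.2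

-- the binary search returns the length of the maximal '< a' prefix of a sorted list
lemma pv_getD_mono (asc : List Int) (hs : asc.Pairwise (· ≤ ·)) (i j : Nat)
    (hij : i ≤ j) (hj : j < asc.length) : asc.getD i 0 ≤ asc.getD j 0 := by
  rcases eq_or_lt_of_le hij with rfl | hlt
  · exact le_refl _
  · rw [List.getD_eq_getElem _ _ (lt_trans hlt hj), List.getD_eq_getElem _ _ hj]
    exact List.pairwise_iff_getElem.mp hs i j _ _ hlt

lemma pv_bisect_spec (asc : List Int) (a : Int) (hs : asc.Pairwise (· ≤ ·)) :
    ∀ (lo hi : Nat), lo ≤ hi → hi ≤ asc.length →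
    (∀ i, i < lo → asc.getD i 0 < a) →
    (∀ i, hi ≤ i → i < asc.length → ¬ asc.getD i 0 < a) →
    lo ≤ pvBisect asc a lo hi ∧ pvBisect asc a lo hi ≤ hi ∧
    (∀ i, i < pvBisect asc a lo hi → asc.getD i 0 < a) ∧
    (∀ i, pvBisect asc a lo hi ≤ i → i < asc.length → ¬ asc.getD i 0 < a) := by
  intro lo hi
  generalize hfuel : hi - lo = n
  induction n using Nat.strong_induction_on generalizing lo hi with
  | _ n ih =>
    intro hle hhi hlo hhiP
    rw [pvBisect]
    by_cases hlh : lo < hi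
    · rw [dif_pos hlh]
      by_cases hmid : asc.getD ((lo + hi) / 2) 0 < a
      · rw [if_pos hmid]
        have hstep := ih (hi - ((lo + hi) / 2 + 1)) (by omega) ((lo + hi) / 2 + 1) hi rfl
          (by omega) hhi
          (fun i hi' => lt_of_le_of_lt
            (pv_getD_mono asc hs i ((lo + hi) / 2) (by omega) (by omega)) hmid)
          hhiP
        exact ⟨by omega, hstep.2.1, hstep.2.2⟩
      · rw [if_neg hmid]
        have hstep := ih (((lo + hi) / 2) - lo) (by omega) lo ((lo + hi) / 2) rfl
          (by omega) (by omega) hlo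
          (fun i hi1 hi2 h' => hmid
            (lt_of_le_of_lt (pv_getD_mono asc hs ((lo + hi) / 2) i hi1 hi2) h'))
        exact ⟨hstep.1, by omega, hstep.2.2⟩
    · rw [dif_neg hlh]
      have : lo = hi := by omega
      exact ⟨le_refl _, hle, hlo, fun i hi1 hi2 => hhiP i (by omega) hi2⟩

-- the run scan is pvMergeEq on the dropped suffix
lemma pv_run_spec (asc : List Int) : ∀ (j : Nat) (a : Int), j ≤ asc.length →
    (pvRun asc a j).1 = (pvMergeEq a (asc.drop j)).1 ∧
    asc.drop (pvRun asc a j).2 = (pvMergeEq a (asc.drop j)).2 ∧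
    (pvRun asc a j).2 ≤ asc.length := by
  intro j
  generalize hfuel : asc.length - j = n
  induction n using Nat.strong_induction_on generalizing j with
  | _ n ih =>
    intro a hj
    rw [pvRun]
    by_cases hlt : j < asc.length
    · rw [dif_pos hlt]
      have hdrop : asc.drop j = asc.getD j 0 :: asc.drop (j + 1) := by
        rw [List.getD_eq_getElem _ _ hlt]
        exact (List.getElem_cons_drop hlt).symm
      by_cases heq : asc.getD j 0 = a
      · rw [if_pos heq]
        have hstep := ih (asc.length - (j + 1)) (by omega) (j + 1) rfl (a + 1) (by omega)
        rw [hdrop, heq]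
        simpa [pvMergeEq] using hstep
      · rw [if_neg heq, hdrop]
        have hm : pvMergeEq a (asc.getD j 0 :: asc.drop (j + 1)) =
            (a, asc.getD j 0 :: asc.drop (j + 1)) := by
          rw [pvMergeEq, if_neg heq]
        rw [hm]
        exact ⟨rfl, rfl, by omega⟩
    · rw [dif_neg hlt]
      have hd : asc.drop j = [] := List.drop_eq_nil_of_le (by omega)
      simp [hd, pvMergeEq]
      omega

lemma pv_mergeLt_eq_takeWhile (a : Int) (l : List Int) :
    pvMergeLt a l = (l.takeWhile (fun x => decide (x < a)), l.dropWhile (fun x => decide (x < a))) := by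
  induction l with
  | nil => simp [pvMergeLt]
  | cons h t ih =>
    by_cases hlt : h < a
    · simp [pvMergeLt, hlt, ih]
    · simp [pvMergeLt, hlt]

lemma pv_takeWhile_eq_take (p : Int → Bool) (l : List Int) : ∀ (r : Nat), r ≤ l.length →
    (∀ i, i < r → p (l.getD i 0)) → (∀ i, r ≤ i → i < l.length → ¬ p (l.getD i 0)) →
    l.takeWhile p = l.take r ∧ l.dropWhile p = l.drop r := by
  induction l with
  | nil =>
    intro r hr _ _
    have h0 : r = 0 := Nat.le_zero.mp (by simpa using hr)
    subst h0
    simp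
  | cons h t ih =>
    intro r hr hlo hhi
    cases r with
    | zero =>
      have hph : ¬ p h := by simpa using hhi 0 (le_refl _) (by simp)
      simp [hph]
    | succ r' =>
      have hph : p h := by simpa using hlo 0 (by omega)
      obtain ⟨h1, h2⟩ := ih r' (by simpa using hr)
        (fun i hi => by simpa using hlo (i + 1) (by omega))
        (fun i hi1 hi2 => by simpa using hhi (i + 1) (by omega) (by simpa using hi2))
      simp [hph, h1, h2]

-- one Source B iteration equals the structural merge, on a sorted list
lemma pv_step_eq_mergeIns (a : Int) (asc : List Int) (hp : asc.Pairwise (· < ·)) :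
    pvStep a asc = pvMergeIns a asc := by
  have hs : asc.Pairwise (· ≤ ·) := hp.imp le_of_lt
  obtain ⟨-, hle, hlo, hhi⟩ := pv_bisect_spec asc a hs 0 asc.length (by omega) (le_refl _)
    (by omega) (by omega)
  obtain ⟨ht, hd⟩ := pv_takeWhile_eq_take (fun x => decide (x < a)) asc
    (pvBisect asc a 0 asc.length) hle
    (fun i hi => by simpa using hlo i hi)
    (fun i hi1 hi2 => by simpa using hhi i hi1 hi2)
  obtain ⟨r1, r2, -⟩ := pv_run_spec asc (pvBisect asc a 0 asc.length) a hle
  unfold pvStep pvMergeIns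
  rw [pv_mergeLt_eq_takeWhile, ht, hd]
  simp only [r1, r2]
  simp


lemma pv_mem_discard (s : PySem.Set Int) (a x : Int) :
    x ∈ PySem.Set.discard s a ↔ x ∈ s ∧ x ≠ a := by
  simp [PySem.Set.discard, List.mem_filter]

-- pvMergeEq versus the carry loop of A: on the part of asc that lies at or above a
lemma pv_step_eq (l : List Int) (s : PySem.Set Int) (a : Int)
    (hp : l.Pairwise (· < ·))
    (hm : ∀ x, x ∈ l ↔ (x ∈ s ∧ a ≤ x))
    (hn : s.Nodup) :
    ((pvMergeEq a l).1 :: (pvMergeEq a l).2).Pairwise (· < ·) ∧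
    (∀ x ∈ (pvMergeEq a l).1 :: (pvMergeEq a l).2, a ≤ x) ∧
    (pvCarryA s a).Nodup ∧
    (∀ x, x ∈ pvCarryA s a ↔ ((x ∈ s ∧ x < a) ∨ x ∈ (pvMergeEq a l).1 :: (pvMergeEq a l).2)) := by
  induction l generalizing s a with
  | nil =>
    have ha : a ∉ s := fun h => by simpa using (hm a).mpr ⟨h, le_refl a⟩
    rw [pvCarryA, dif_neg ha]
    refine ⟨by simp [pvMergeEq], by simp [pvMergeEq], PySem.Set.nodup_add s a hn, fun x => ?_⟩
    simp only [pvMergeEq, PySem.Set.mem_add]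
    constructor
    · rintro (hx | rfl)
      · rcases lt_or_ge x a with h' | h'
        · exact Or.inl ⟨hx, h'⟩
        · exact absurd ((hm x).mpr ⟨hx, h'⟩) (by simp)
      · simp
    · rintro (⟨hx, _⟩ | hx)
      · exact Or.inl hx
      · simp at hx; subst hx; simp
  | cons h t ih =>
    have hht : ∀ x ∈ t, h < x := fun x hx => List.rel_of_pairwise_cons hp hx
    have hpt : t.Pairwise (· < ·) := hp.of_cons
    by_cases hha : h = a
    · subst hha
      have hhs : h ∈ s := ((hm h).mp (by simp)).1
      rw [pvCarryA, dif_pos hhs]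
      have hmt : ∀ x, x ∈ t ↔ (x ∈ PySem.Set.discard s h ∧ h + 1 ≤ x) := by
        intro x
        rw [pv_mem_discard]
        constructor
        · intro hx
          obtain ⟨hs, _⟩ := (hm x).mp (List.mem_cons_of_mem _ hx)
          exact ⟨⟨hs, (hht x hx).ne'⟩, hht x hx⟩
        · rintro ⟨⟨hs, hne⟩, hle⟩
          rcases List.mem_cons.mp ((hm x).mpr ⟨hs, by omega⟩) with hx | hx
          · exact absurd hx hne
          · exact hx
      obtain ⟨c1, c2, c3, c4⟩ := ih (PySem.Set.discard s h) (h + 1) hpt hmt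
        (PySem.Set.nodup_discard s h hn)
      have heq : pvMergeEq h (h :: t) = pvMergeEq (h + 1) t := by
        simp [pvMergeEq]
      rw [heq]
      refine ⟨c1, fun x hx => by have := c2 x hx; omega, c3, fun x => ?_⟩
      rw [c4 x]
      constructor
      · rintro (⟨hx, hlt⟩ | hx)
        · rw [pv_mem_discard] at hx
          exact Or.inl ⟨hx.1, by omega⟩
        · exact Or.inr hx
      · rintro (⟨hx, hlt⟩ | hx)
        · exact Or.inl ⟨(pv_mem_discard s h x).mpr ⟨hx, by omega⟩, by omega⟩
        · exact Or.inr hx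
    · have hah : a < h := lt_of_le_of_ne ((hm h).mp (by simp)).2 (Ne.symm hha)
      have hal : a ∉ h :: t := by
        intro hx
        rcases List.mem_cons.mp hx with hx | hx
        · exact hha hx.symm
        · exact absurd (hht a hx) (by omega)
      have has : a ∉ s := fun hs => hal ((hm a).mpr ⟨hs, le_refl a⟩)
      rw [pvCarryA, dif_neg has]
      have heq : pvMergeEq a (h :: t) = (a, h :: t) := by
        simp [pvMergeEq, hha]
      rw [heq]
      refine ⟨?_, ?_, PySem.Set.nodup_add s a hn, fun x => ?_⟩
      · exact List.Pairwise.cons (fun x hx => by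
          rcases List.mem_cons.mp hx with hx | hx
          · omega
          · exact hah.trans (hht x hx)) hp
      · intro x hx
        rcases List.mem_cons.mp hx with hx | hx
        · omega
        · exact ((hm x).mp hx).2
      · rw [PySem.Set.mem_add]
        constructor
        · rintro (hx | rfl)
          · rcases lt_or_ge x a with h' | h'
            · exact Or.inl ⟨hx, h'⟩
            · exact Or.inr (List.mem_cons_of_mem _ ((hm x).mpr ⟨hx, h'⟩))
          · exact Or.inr (by simp)
        · rintro (⟨hx, _⟩ | hx)
          · exact Or.inl hx
          · rcases List.mem_cons.mp hx with hx | hx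
            · exact Or.inr hx
            · exact Or.inl ((hm x).mp hx).1

-- the first while of Source B splits asc (strictly ascending) at a
lemma pv_mergeLt_split (a : Int) (l : List Int) (hp : l.Pairwise (· < ·)) :
    (pvMergeLt a l).1 ++ (pvMergeLt a l).2 = l ∧
    (∀ x ∈ (pvMergeLt a l).1, x < a) ∧
    (∀ x ∈ (pvMergeLt a l).2, a ≤ x) := by
  induction l with
  | nil => simp [pvMergeLt]
  | cons h t ih =>
    have hht : ∀ x ∈ t, h < x := fun x hx => List.rel_of_pairwise_cons hp hx
    by_cases hlt : h < a
    · obtain ⟨i1, i2, i3⟩ := ih hp.of_cons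
      simp only [pvMergeLt, if_pos hlt]
      refine ⟨by simpa using i1, ?_, i3⟩
      intro x hx
      rcases List.mem_cons.mp hx with hx | hx
      · omega
      · exact i2 x hx
    · simp only [pvMergeLt, if_neg hlt]
      refine ⟨rfl, by simp, ?_⟩
      intro x hx
      rcases List.mem_cons.mp hx with hx | hx
      · omega
      · exact le_trans (by omega) (le_of_lt (hht x hx))

-- one loop iteration preserves the simulation invariant
lemma pv_step (s : PySem.Set Int) (asc : List Int) (a : Int)
    (hn : s.Nodup) (hp : asc.Pairwise (· < ·)) (hm : ∀ x, x ∈ asc ↔ x ∈ s) :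
    (pvCarryA s a).Nodup ∧ (pvMergeIns a asc).Pairwise (· < ·) ∧
    (∀ x, x ∈ pvMergeIns a asc ↔ x ∈ pvCarryA s a) := by
  obtain ⟨hsplit, hlo, hhi⟩ := pv_mergeLt_split a asc hp
  have hsub : (pvMergeLt a asc).2.Pairwise (· < ·) := by
    have h2 := List.sublist_append_right (pvMergeLt a asc).1 (pvMergeLt a asc).2
    rw [hsplit] at h2
    exact hp.sublist h2
  have hmemR : ∀ x, x ∈ (pvMergeLt a asc).2 ↔ (x ∈ s ∧ a ≤ x) := by
    intro x
    constructor
    · intro hx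
      exact ⟨(hm x).mp (hsplit ▸ List.mem_append_right _ hx), hhi x hx⟩
    · rintro ⟨hs, hle⟩
      have hx : x ∈ asc := (hm x).mpr hs
      rw [← hsplit] at hx
      rcases List.mem_append.mp hx with hx | hx
      · exact absurd (hlo x hx) (by omega)
      · exact hx
  obtain ⟨c1, c2, c3, c4⟩ := pv_step_eq (pvMergeLt a asc).2 s a hsub hmemR hn
  have hpre : (pvMergeLt a asc).1.Pairwise (· < ·) := by
    have h1 := List.sublist_append_left (pvMergeLt a asc).1 (pvMergeLt a asc).2
    rw [hsplit] at h1
    exact hp.sublist h1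
  refine ⟨c3, ?_, fun x => ?_⟩
  · unfold pvMergeIns
    refine List.pairwise_append.mpr ⟨hpre, c1, ?_⟩
    intro x hx y hy
    exact lt_of_lt_of_le (hlo x hx) (c2 y hy)
  · unfold pvMergeIns
    rw [List.mem_append, c4 x]
    constructor
    · rintro (hx | hx)
      · exact Or.inl ⟨(hm x).mp (hsplit ▸ List.mem_append_left _ hx), hlo x hx⟩
      · exact Or.inr hx
    · rintro (⟨hs, hlt⟩ | hx)
      · have hx : x ∈ asc := (hm x).mpr hs
        rw [← hsplit] at hx
        rcases List.mem_append.mp hx with hx | hx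
        · exact Or.inl hx
        · exact absurd (hhi x hx) (by omega)
      · exact Or.inr hx

lemma pv_fold (A : List Int) (s : PySem.Set Int) (asc : List Int)
    (hn : s.Nodup) (hp : asc.Pairwise (· < ·)) (hm : ∀ x, x ∈ asc ↔ x ∈ s) :
    (A.foldl (fun s a => pvCarryA s a) s).Nodup ∧
    (A.foldl (fun asc a => pvStep a asc) asc).Pairwise (· < ·) ∧
    (∀ x, x ∈ A.foldl (fun asc a => pvStep a asc) asc ↔
          x ∈ A.foldl (fun s a => pvCarryA s a) s) := by
  induction A generalizing s asc with
  | nil => exact ⟨hn, hp, hm⟩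
  | cons a A ih =>
    obtain ⟨h1, h2, h3⟩ := pv_step s asc a hn hp hm
    simp only [List.foldl_cons]
    rw [pv_step_eq_mergeIns a asc hp]
    exact ih _ _ h1 h2 h3

-- ===== VERDICT (by name: the statement is the Claim_ definition above) =====
theorem shortest_equivalent_binarian_spec : Claim_equal_shortest_equivalent_binarian := by
  intro A _
  unfold Spec_shortest_equivalent_binarian shortest_equivalent_binarian shortest_equivalent_binarian_alt
  obtain ⟨hn, hp, hm⟩ := pv_fold A PySem.Set.empty [] (by simp [PySem.Set.empty]) (by simp) (by simp [PySem.Set.empty])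
  refine PySem.List.sorted_rev_eq_of_perm_of_pairwise_gt (κ := Int) _ _ _ ?_ ?_
  · refine (List.reverse_perm _).trans ?_
    exact (List.perm_ext_iff_of_nodup (hp.imp ne_of_lt) hn).mpr hm
  · exact (List.pairwise_reverse).mpr hp
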